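-- pv_equiv track=rewrite | github.com/hanxiao/real-esrgan-coreml | upscale.py | compute_tile_starts
-- ===== SOURCE A (Python) =====
-- def compute_tile_starts(total_size: int, tile_size: int, overlap: int) -> list:
--     """Return list of start positions for tiles along one axis."""
--     if total_size <= tile_size:
--         return [0]
--     stride = tile_size - overlap
--     positions = []
--     pos = 0
--     while pos < total_size:
--         if pos + tile_size >= total_size:
--             positions.append(total_size - tile_size)
--             break
--         positions.append(pos)
--         pos += stride
--     return positions
-- ===== SOURCE B (Python) =====
-- def compute_tile_starts(total_size: int, tile_size: int, overlap: int) -> list: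
--     """Return list of start positions for tiles along one axis."""
--     if total_size <= tile_size:
--         return [0]
--     stride = tile_size - overlap
--     # number of regular (unclamped) tiles = ceil((total_size - tile_size) / stride)
--     n_regular = -((tile_size - total_size) // stride)
--     return [i * stride for i in range(n_regular)] + [total_size - tile_size]
-- ===== Notes on version B (the rewrite author's own statement) =====
-- stated objective: alternative
-- what changed: Replaces A's stateful stepping loop with its in-body overrun check and break by a closed-form tile count via ceiling division, a comprehension generating the regular starts from their indices, and one appended clamped final start.
-- outside the precondition, e.g. on compute_tile_starts(10, 1, -20): A returns [0], B returns [0, 9]; on compute_tile_starts(10, 3, -5): A returns [0, 7], B returns [0, 7]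
import Mathlib
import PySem

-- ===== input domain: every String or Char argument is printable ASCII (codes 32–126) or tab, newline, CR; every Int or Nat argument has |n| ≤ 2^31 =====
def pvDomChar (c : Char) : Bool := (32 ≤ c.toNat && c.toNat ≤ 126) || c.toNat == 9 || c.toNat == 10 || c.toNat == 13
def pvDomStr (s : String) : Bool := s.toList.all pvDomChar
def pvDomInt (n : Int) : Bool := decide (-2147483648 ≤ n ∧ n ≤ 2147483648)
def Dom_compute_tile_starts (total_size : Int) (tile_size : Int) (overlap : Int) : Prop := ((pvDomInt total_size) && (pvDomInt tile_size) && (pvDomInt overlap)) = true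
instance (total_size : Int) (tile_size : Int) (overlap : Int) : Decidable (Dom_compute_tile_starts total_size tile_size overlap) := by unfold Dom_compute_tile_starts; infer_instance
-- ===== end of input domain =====

-- B computes the regular tile count in closed form by ceiling division and builds the starts
-- from their indices, plus one appended clamped final start, replacing A's stateful stepping
-- loop with its in-body overrun check and break (alternative decomposition, same cost).


-- ===== PORT A =====
-- the while-loop of A, as fuel-indexed recursion (fuel only makes the loop total in Lean;
-- under Pre_ it is never exhausted — see ctsLoop_eq below)
def ctsLoop (total_size : Int) (tile_size : Int) (stride : Int) : Nat → Int → List Int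
  | 0, _ => []
  | fuel + 1, pos =>
    if pos < total_size then
      if pos + tile_size ≥ total_size then
        [total_size - tile_size]
      else
        pos :: ctsLoop total_size tile_size stride fuel (pos + stride)
    else []

def compute_tile_starts (total_size : Int) (tile_size : Int) (overlap : Int) : List Int :=
  if total_size ≤ tile_size then [0]
  else
    ctsLoop total_size tile_size (tile_size - overlap) (total_size.toNat + 1) 0

-- ===== PORT B =====
def compute_tile_starts_alt (total_size : Int) (tile_size : Int) (overlap : Int) : List Int :=
  if total_size ≤ tile_size then [0]
  else
    let stride := tile_size - overlap
    let n_regular := -(PySem.Int.floordiv (tile_size - total_size) stride)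
    (PySem.List.pyRange 0 n_regular 1).map (fun i => i * stride)
      ++ [total_size - tile_size]

-- ===== PRECONDITION & SPEC =====
-- Pre_ restricts to the natural tiling domain 0 ≤ overlap < tile_size (unless total_size ≤ tile_size,
-- where A returns [0] immediately): for overlap ≥ tile_size A's loop never terminates, and a negative
-- overlap is outside the function's purpose (A can then skip the final clamped tile).
def Pre_compute_tile_starts (total_size : Int) (tile_size : Int) (overlap : Int) : Prop :=
  total_size ≤ tile_size ∨ (0 ≤ overlap ∧ overlap < tile_size)
instance (total_size : Int) (tile_size : Int) (overlap : Int) : Decidable (Pre_compute_tile_starts total_size tile_size overlap) := by unfold Pre_compute_tile_starts; infer_instance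

def pvWitness_compute_tile_starts : Int × Int × Int := (10, 4, 1)

def Spec_compute_tile_starts (total_size : Int) (tile_size : Int) (overlap : Int) (out : List Int) : Prop := out = compute_tile_starts_alt total_size tile_size overlap
instance (total_size : Int) (tile_size : Int) (overlap : Int) (out : List Int) : Decidable (Spec_compute_tile_starts total_size tile_size overlap out) := by unfold Spec_compute_tile_starts; infer_instance

-- ===== CLAIM (what is proved, stated in full; the proofs are below) =====
def Claim_equal_compute_tile_starts : Prop := ∀ (total_size : Int) (tile_size : Int) (overlap : Int), Dom_compute_tile_starts total_size tile_size overlap → Pre_compute_tile_starts total_size tile_size overlap → Spec_compute_tile_starts total_size tile_size overlap (compute_tile_starts total_size tile_size overlap)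

-- ===== LEMMAS AND PROOFS =====

theorem pyRange_nil_of_pos (a b : Int) {s : Int} (hs : 0 < s) (hab : b ≤ a) :
    PySem.List.pyRange a b s = [] := by
  rw [PySem.List.pyRange_of_pos _ _ hs, if_neg (by omega)]
  simp

-- ceiling division: -((-a) // s) = (a + s - 1) / s for 0 < s (Euclidean division on the right)
theorem neg_floordiv_neg_eq_ceil (a : Int) {s : Int} (hs : 0 < s) :
    -(PySem.Int.floordiv (-a) s) = (a + s - 1) / s := by
  have hfd : PySem.Int.floordiv (-a) s = (-a) / s := by
    rw [PySem.Int.floordiv, Int.fdiv_eq_ediv, if_pos (Or.inl (le_of_lt hs))]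
    ring
  rw [hfd]
  have hq := Int.mul_ediv_add_emod a s
  have hr0 : 0 ≤ a % s := Int.emod_nonneg a (by omega)
  have hrs : a % s < s := Int.emod_lt_of_pos a hs
  set q := a / s with hqdef
  set r := a % s with hrdef
  have ha : a = s * q + r := by omega
  by_cases hr : r = 0
  · have h1 : a + s - 1 = (s - 1) + q * s := by rw [ha, hr]; ring
    have h2 : -a = 0 + (-q) * s := by rw [ha, hr]; ring
    rw [h1, h2, Int.add_mul_ediv_right _ _ (by omega : s ≠ 0),
      Int.add_mul_ediv_right _ _ (by omega : s ≠ 0),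
      Int.ediv_eq_zero_of_lt (by omega) (by omega),
      Int.ediv_eq_zero_of_lt (by omega) (by omega)]
    omega
  · have h1 : a + s - 1 = (r - 1) + (q + 1) * s := by rw [ha]; ring
    have h2 : -a = (s - r) + (-q - 1) * s := by rw [ha]; ring
    rw [h1, h2, Int.add_mul_ediv_right _ _ (by omega : s ≠ 0),
      Int.add_mul_ediv_right _ _ (by omega : s ≠ 0),
      Int.ediv_eq_zero_of_lt (by omega) (by omega),
      Int.ediv_eq_zero_of_lt (by omega) (by omega)]
    omega

-- range(0, last, s) is the list of the first ceil(last/s) multiples of s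
theorem pyRange_step_eq_map_mul (last : Int) {s : Int} (hs : 0 < s) (hl : 0 < last) :
    PySem.List.pyRange 0 last s
      = (PySem.List.pyRange 0 (-(PySem.Int.floordiv (-last) s)) 1).map (fun i => i * s) := by
  rw [PySem.List.pyRange_one, neg_floordiv_neg_eq_ceil last hs,
    PySem.List.pyRange_of_pos _ _ hs, if_pos (by omega), List.map_map]
  simp only [sub_zero]
  apply List.map_congr_left
  intro k _
  simp only [Function.comp_apply]
  ring

-- loop invariant: with enough fuel, a positive stride and pos < total - overlap, the while-loop
-- produces range(pos, last, stride) ++ [last]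
theorem pyRange_cons_of_pos (a b : Int) {s : Int} (hs : 0 < s) (hab : a < b) :
    PySem.List.pyRange a b s = a :: PySem.List.pyRange (a + s) b s := by
  rw [PySem.List.pyRange_of_pos _ _ hs, PySem.List.pyRange_of_pos _ _ hs]
  rw [if_pos hab]
  have hkey : ((b - a + s - 1) / s).toNat
      = (if a + s < b then ((b - (a + s) + s - 1) / s).toNat else 0) + 1 := by
    have h1 : b - a + s - 1 = (b - a - 1) + 1 * s := by ring
    have h2 : (b - a + s - 1) / s = (b - a - 1) / s + 1 := by
      rw [h1, Int.add_mul_ediv_right _ _ (by omega : s ≠ 0)]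
    split_ifs with h
    · have : b - (a + s) + s - 1 = b - a - 1 := by ring
      rw [this]
      have hnn : 0 ≤ (b - a - 1) / s := Int.ediv_nonneg (by omega) (by omega)
      omega
    · have h0 : (b - a - 1) / s = 0 := Int.ediv_eq_zero_of_lt (by omega) (by omega)
      omega
  rw [hkey, List.range_succ_eq_map, List.map_cons, List.map_map]
  simp only [Nat.cast_zero, mul_zero, add_zero, List.cons.injEq, true_and]
  apply List.map_congr_left
  intro k _
  simp only [Function.comp_apply]
  push_cast; ring

theorem ctsLoop_eq (total_size tile_size overlap : Int)
    (hov : 0 ≤ overlap) (hst : overlap < tile_size) :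
    ∀ (fuel : Nat) (pos : Int),
      (total_size - tile_size - pos).toNat < fuel →
      pos < total_size - overlap →
      ctsLoop total_size tile_size (tile_size - overlap) fuel pos
        = PySem.List.pyRange pos (total_size - tile_size) (tile_size - overlap)
            ++ [total_size - tile_size] := by
  intro fuel
  induction fuel with
  | zero => intro pos hf; omega
  | succ n ih =>
    intro pos hf hpos
    have hs : (0:Int) < tile_size - overlap := by omega
    rw [ctsLoop, if_pos (by omega)]
    by_cases hbr : pos + tile_size ≥ total_size
    · rw [if_pos hbr, pyRange_nil_of_pos _ _ hs (by omega)]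
      simp
    · rw [if_neg hbr,
        pyRange_cons_of_pos _ _ hs (by omega),
        ih (pos + (tile_size - overlap)) (by omega) (by omega)]
      simp

-- ===== VERDICT (by name: the statement is the Claim_ definition above) =====
theorem compute_tile_starts_spec : Claim_equal_compute_tile_starts := by
  intro total_size tile_size overlap _ hpre
  unfold Spec_compute_tile_starts compute_tile_starts compute_tile_starts_alt
  by_cases h : total_size ≤ tile_size
  · rw [if_pos h, if_pos h]
  · rw [if_neg h, if_neg h]
    rcases hpre with h' | ⟨hov, hst⟩
    · omega
    · have hs : (0:Int) < tile_size - overlap := by omega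
      rw [ctsLoop_eq total_size tile_size overlap hov hst
        (total_size.toNat + 1) 0 (by omega) (by omega)]
      have : tile_size - total_size = -(total_size - tile_size) := by ring
      simp only [this]
      rw [pyRange_step_eq_map_mul (total_size - tile_size) hs (by omega)]
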